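-- pv_equiv track=rewrite | github.com/DevWillintong/Reconocimiento-Facial | Main-DESKTOP-2N7CDB8.py | project_Cost
-- ===== SOURCE A (Python) =====
-- def project_Cost(list_projects, list_costs):
--     id_projects = []
--     cost_projects = []
--     flag = -1
--     count = 0
--     for id in list_projects:
--         try:
--             flag = id_projects.index(id)
--             if cost_projects[flag] > list_costs[count]:
--                 cost_projects[flag] = list_costs[count]
--         except:
--             id_projects.append(id)
--             cost_projects.append(list_costs[count])
--         count += 1
--
--     return id_projects, cost_projects
-- ===== SOURCE B (Python) =====
-- def project_Cost(list_projects, list_costs):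
--     # Pass 1: unique ids in first-occurrence order (membership on a list, as A does via .index)
--     id_projects = []
--     for pid in list_projects:
--         if pid not in id_projects:
--             id_projects.append(pid)
--     # Pass 2: per unique id, minimum of all costs at its positions
--     cost_projects = [
--         min(list_costs[i] for i in range(len(list_projects)) if list_projects[i] == pid)
--         for pid in id_projects
--     ]
--     return id_projects, cost_projects
-- ===== Notes on version B (the rewrite author's own statement) =====
-- stated objective: alternative
-- what changed: Replaces A's single try/except pass that keeps a running minimum per id (via list.index and in-place updates) with two separate passes: first build the unique-id list in first-occurrence order, then compute each id's minimum by a grouped scan over all positions.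
import Mathlib
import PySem

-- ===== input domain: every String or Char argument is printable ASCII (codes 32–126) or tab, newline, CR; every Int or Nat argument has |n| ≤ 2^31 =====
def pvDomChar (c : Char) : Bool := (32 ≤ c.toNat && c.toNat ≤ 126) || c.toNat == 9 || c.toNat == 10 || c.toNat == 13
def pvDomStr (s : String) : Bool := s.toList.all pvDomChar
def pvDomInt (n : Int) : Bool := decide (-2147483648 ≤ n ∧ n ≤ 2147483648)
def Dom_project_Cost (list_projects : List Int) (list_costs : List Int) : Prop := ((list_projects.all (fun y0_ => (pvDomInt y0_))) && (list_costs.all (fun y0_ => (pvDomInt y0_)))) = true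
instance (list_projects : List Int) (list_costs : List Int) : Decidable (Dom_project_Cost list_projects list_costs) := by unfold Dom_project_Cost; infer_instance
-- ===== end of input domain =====

-- B replaces A's single try/except pass with a running per-id minimum by two passes:
-- collect unique ids in first-occurrence order, then take the minimum of each id's costs
-- by a grouped scan (alternative decomposition, same asymptotic cost).

-- ===== PORT A =====
-- A's loop: for each id, try index/compare-update; except (new id, or cost index error) append.
-- On the paths where Python raises IndexError (count out of range of list_costs, excluded by
-- Pre_), the port simply continues with the state unchanged (A returns no value there).
def projectCostGoA (lc : List Int) : List Int → Nat → List Int → List Int → List Int × List Int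
  | [], _, ids, cs => (ids, cs)
  | id :: rest, count, ids, cs =>
    match PySem.List.index? ids id with
    | some flag =>
      match cs[flag]?, lc[count]? with
      | some cv, some c =>
          projectCostGoA lc rest (count + 1) ids (if cv > c then cs.set flag c else cs)
      | _, _ => projectCostGoA lc rest (count + 1) ids cs
    | none =>
      match lc[count]? with
      | some c => projectCostGoA lc rest (count + 1) (ids ++ [id]) (cs ++ [c])
      | none => projectCostGoA lc rest (count + 1) (ids ++ [id]) cs

def project_Cost (list_projects : List Int) (list_costs : List Int) : List Int × List Int :=
  projectCostGoA list_costs list_projects 0 [] []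

-- ===== PORT B =====
-- pass 2 helper: [list_costs[i] for i in range(len(list_projects)) if list_projects[i] == pid]
def projectCostGather (lp lc : List Int) (pid : Int) : List Int :=
  ((List.range lp.length).filter (fun i => decide (lp[i]? = some pid))).filterMap (fun i => lc[i]?)

def project_Cost_alt (list_projects : List Int) (list_costs : List Int) : List Int × List Int :=
  let ids := list_projects.foldl (fun acc pid => if pid ∈ acc then acc else acc ++ [pid]) []
  (ids, ids.map (fun pid =>
    (PySem.List.min? (projectCostGather list_projects list_costs pid) (fun x => x)).getD 0))

-- ===== PRECONDITION & SPEC =====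
-- Pre_ excludes exactly the inputs with len(list_costs) < len(list_projects), on which A
-- raises IndexError at list_costs[count] (B raises there too).
def Pre_project_Cost (list_projects : List Int) (list_costs : List Int) : Prop :=
  list_projects.length ≤ list_costs.length
instance (list_projects : List Int) (list_costs : List Int) : Decidable (Pre_project_Cost list_projects list_costs) := by unfold Pre_project_Cost; infer_instance

def pvWitness_project_Cost : List Int × List Int := ([1, 2, 1, 3, 2], [5, 3, 2, 7, 1])

def Spec_project_Cost (list_projects : List Int) (list_costs : List Int) (out : List Int × List Int) : Prop := out = project_Cost_alt list_projects list_costs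
instance (list_projects : List Int) (list_costs : List Int) (out : List Int × List Int) : Decidable (Spec_project_Cost list_projects list_costs out) := by unfold Spec_project_Cost; infer_instance

-- ===== CLAIM (what is proved, stated in full; the proofs are below) =====
def Claim_equal_project_Cost : Prop := ∀ (list_projects : List Int) (list_costs : List Int), Dom_project_Cost list_projects list_costs → Pre_project_Cost list_projects list_costs → Spec_project_Cost list_projects list_costs (project_Cost list_projects list_costs)

-- ===== LEMMAS AND PROOFS =====

/-- The common normal form: unique ids in first-occurrence order (B's pass 1). -/
def pvUniq (l : List Int) : List Int :=
  l.foldl (fun acc pid => if pid ∈ acc then acc else acc ++ [pid]) []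

/-- Minimum cost of `pid` in a list of (id, cost) pairs. -/
def pvMin (P : List (Int × Int)) (pid : Int) : Int :=
  (PySem.List.min? ((P.filter (fun p => p.1 == pid)).map Prod.snd) (fun x => x)).getD 0

theorem pvUniq_aux_mem (l : List Int) (acc : List Int) (x : Int) :
    x ∈ l.foldl (fun acc pid => if pid ∈ acc then acc else acc ++ [pid]) acc ↔ x ∈ acc ∨ x ∈ l := by
  induction l generalizing acc with
  | nil => simp
  | cons a l ih =>
    simp only [List.foldl_cons]
    by_cases ha : a ∈ acc
    · simp only [if_pos ha, ih]
      constructor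
      · rintro (h | h) <;> simp_all
      · rintro (h | h)
        · exact Or.inl h
        · rcases List.mem_cons.mp h with rfl | h
          · exact Or.inl ha
          · exact Or.inr h
    · simp only [if_neg ha, ih, List.mem_append, List.mem_cons]
      tauto

theorem pvUniq_mem (l : List Int) (x : Int) : x ∈ pvUniq l ↔ x ∈ l := by
  simp [pvUniq, pvUniq_aux_mem]

theorem pvUniq_aux_nodup (l : List Int) (acc : List Int) (h : acc.Nodup) :
    (l.foldl (fun acc pid => if pid ∈ acc then acc else acc ++ [pid]) acc).Nodup := by
  induction l generalizing acc with
  | nil => simpa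
  | cons a l ih =>
    simp only [List.foldl_cons]
    by_cases ha : a ∈ acc
    · simpa [if_pos ha] using ih acc h
    · rw [if_neg ha]
      refine ih _ ?_
      simp [List.nodup_append, h]
      exact fun b hb hcon => ha (hcon ▸ hb)

theorem pvUniq_nodup (l : List Int) : (pvUniq l).Nodup :=
  pvUniq_aux_nodup l [] List.nodup_nil

theorem pvUniq_append_singleton (l : List Int) (x : Int) :
    pvUniq (l ++ [x]) = if x ∈ pvUniq l then pvUniq l else pvUniq l ++ [x] := by
  simp [pvUniq, List.foldl_append]

/-- `goA` processes an appended list by processing the pieces in order. -/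
theorem projectCostGoA_append (lc l₁ l₂ : List Int) (count : Nat) (ids cs : List Int) :
    projectCostGoA lc (l₁ ++ l₂) count ids cs =
      projectCostGoA lc l₂ (count + l₁.length)
        (projectCostGoA lc l₁ count ids cs).1 (projectCostGoA lc l₁ count ids cs).2 := by
  induction l₁ generalizing count ids cs with
  | nil => simp [projectCostGoA]
  | cons a l₁ ih =>
    simp only [List.cons_append, projectCostGoA, List.length_cons]
    have harith : count + 1 + l₁.length = count + (l₁.length + 1) := by omega
    cases h : PySem.List.index? ids a with
    | some flag =>
      cases h1 : cs[flag]? with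
      | some cv =>
        cases h2 : lc[count]? with
        | some c => simp only [h1, h2]; rw [ih, harith]
        | none => simp only [h1, h2]; rw [ih, harith]
      | none =>
        cases h2 : lc[count]? with
        | some c => simp only [h1, h2]; rw [ih, harith]
        | none => simp only [h1, h2]; rw [ih, harith]
    | none =>
      cases h2 : lc[count]? with
      | some c => simp only [h2]; rw [ih, harith]
      | none => simp only [h2]; rw [ih, harith]

theorem pvMin_append_of_ne (P : List (Int × Int)) (x c pid : Int) (h : pid ≠ x) :
    pvMin (P ++ [(x, c)]) pid = pvMin P pid := by
  simp [pvMin, List.filter_append, beq_iff_eq, Ne.symm h]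

theorem pvMin_append_self (P : List (Int × Int)) (x c : Int)
    (h : P.filter (fun p => p.1 == x) ≠ []) :
    pvMin (P ++ [(x, c)]) x = if pvMin P x > c then c else pvMin P x := by
  rcases hQ : P.filter (fun p => p.1 == x) with _ | ⟨q, t⟩
  · exact absurd hQ h
  · have : (P ++ [(x, c)]).filter (fun p => p.1 == x) = (q :: t) ++ [(x, c)] := by
      simp [List.filter_append, hQ]
    simp only [pvMin, this, hQ, List.map_append, List.map_cons, List.map_nil]
    rw [List.cons_append, PySem.List.min?_id_cons, PySem.List.min?_id_cons]
    simp only [Option.getD_some, List.foldl_append, List.foldl_cons, List.foldl_nil]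
    rcases le_or_gt (List.foldl min q.2 (t.map Prod.snd)) c with hle | hlt
    · rw [if_neg (by omega), min_eq_left hle]
    · rw [if_pos (by omega), min_eq_right (le_of_lt hlt)]

theorem pvMin_append_new (P : List (Int × Int)) (x c : Int)
    (h : P.filter (fun p => p.1 == x) = []) :
    pvMin (P ++ [(x, c)]) x = c := by
  simp [pvMin, List.filter_append, h, PySem.List.min?]

/-- Zipping after appending one element, when the right list is long enough. -/
theorem pvZip_concat (l lc : List Int) (x c : Int) (h : lc[l.length]? = some c) :
    (l ++ [x]).zip lc = l.zip lc ++ [(x, c)] := by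
  induction l generalizing lc with
  | nil =>
    cases lc with
    | nil => simp at h
    | cons b lc' => simp_all
  | cons a l ih =>
    cases lc with
    | nil => simp at h
    | cons b lc' =>
      simp only [List.length_cons, List.getElem?_cons_succ] at h
      simp [List.zip_cons_cons, ih lc' h]

theorem pvZip_fst_mem (l lc : List Int) (p : Int × Int) (hp : p ∈ l.zip lc) : p.1 ∈ l :=
  (List.of_mem_zip hp).1

theorem pvZip_filter_ne_nil (l lc : List Int) (x : Int) (hx : x ∈ l)
    (hlen : l.length ≤ lc.length) : (l.zip lc).filter (fun p => p.1 == x) ≠ [] := by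
  obtain ⟨i, hi, rfl⟩ := List.getElem_of_mem hx
  have hilc : i < lc.length := lt_of_lt_of_le hi hlen
  have : (l[i], lc[i]) ∈ l.zip lc := by
    rw [List.mem_iff_getElem]
    exact ⟨i, by simp [hi, hilc], by simp⟩
  intro hcon
  have hmemf : (l[i], lc[i]) ∈ (l.zip lc).filter (fun p => p.1 == l[i]) :=
    List.mem_filter.mpr ⟨this, by simp⟩
  rw [hcon] at hmemf
  exact (List.not_mem_nil).elim hmemf

/-- The core invariant: A's loop computes the unique ids with their running minima,
which equal the grouped minima over the processed (id, cost) pairs. -/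
theorem projectCostGoA_spec (lc : List Int) (lp : List Int)
    (hlen : lp.length ≤ lc.length) :
    projectCostGoA lc lp 0 [] [] = (pvUniq lp, (pvUniq lp).map (pvMin (lp.zip lc))) := by
  induction lp using List.reverseRecOn with
  | nil => simp [projectCostGoA, pvUniq]
  | append_singleton l x ih =>
    have hl : l.length ≤ lc.length := by simp at hlen; omega
    have hlt : l.length < lc.length := by simp at hlen; omega
    obtain ⟨c, hc⟩ : ∃ c, lc[l.length]? = some c := ⟨lc[l.length], by simp [hlt]⟩
    have hzip : (l ++ [x]).zip lc = l.zip lc ++ [(x, c)] := pvZip_concat l lc x c hc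
    rw [projectCostGoA_append, ih hl, Nat.zero_add]
    set ids := pvUniq l with hids
    set P := l.zip lc with hP
    by_cases hx : x ∈ ids
    · -- x already seen: index some, running-min update
      have hsome : (PySem.List.index? ids x).isSome = true :=
        (PySem.List.index?_isSome_iff ids x).mpr hx
      obtain ⟨flag, hflag⟩ := Option.isSome_iff_exists.mp hsome
      obtain ⟨hfl, hfx, -⟩ := PySem.List.getElem_of_index?_eq_some hflag
      have hcs : (ids.map (pvMin P))[flag]? = some (pvMin P x) := by
        rw [List.getElem?_map, List.getElem?_eq_getElem hfl]
        simp [hfx]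
      simp only [projectCostGoA, hflag, hcs, hc]
      have hxl : x ∈ l := (pvUniq_mem l x).mp hx
      have hmx : pvMin (P ++ [(x, c)]) x = if pvMin P x > c then c else pvMin P x :=
        pvMin_append_self P x c (pvZip_filter_ne_nil l lc x hxl hl)
      rw [pvUniq_append_singleton, if_pos hx, Prod.mk.injEq]
      refine ⟨rfl, ?_⟩
      have hnodup := pvUniq_nodup l
      rw [hzip]
      by_cases hgt : pvMin P x > c
      · rw [if_pos hgt]
        apply List.ext_getElem
        · simp [hids]
        · intro j hj1 hj2
          have hjb : j < ids.length := by simpa using hj2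
          by_cases hjf : j = flag
          · subst hjf
            simp [hfx, hmx, hgt]
            have hfx' : (pvUniq l)[j]'(by simpa using hj2) = x := hfx
            rw [hfx', hmx, if_pos hgt]
          · have hjx : ids[j]'hjb ≠ x := by
              intro hcon
              exact hjf ((List.Nodup.getElem_inj_iff hnodup).mp (hcon.trans hfx.symm))
            simp [List.getElem_set_ne (Ne.symm hjf)]
            exact (pvMin_append_of_ne P x c _ hjx).symm
      · rw [if_neg hgt]
        apply List.map_congr_left
        intro pid hpid
        by_cases hpx : pid = x
        · subst hpx
          rw [hmx, if_neg hgt]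
        · rw [pvMin_append_of_ne P x c pid hpx]
    · -- x is new: index none, append id and its cost
      have hflag := (PySem.List.index?_eq_none_iff (xs := ids) (v := x)).mpr hx
      simp only [projectCostGoA, hflag, hc]
      have hxl : x ∉ l := fun hc' => hx ((pvUniq_mem l x).mpr hc')
      have hfil : P.filter (fun p => p.1 == x) = [] := by
        rw [List.filter_eq_nil_iff]
        intro p hp
        simp only [beq_iff_eq]
        intro hcon
        exact hxl (hcon ▸ pvZip_fst_mem l lc p hp)
      rw [pvUniq_append_singleton, if_neg hx, hzip, Prod.mk.injEq]
      refine ⟨rfl, ?_⟩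
      rw [List.map_append, List.map_singleton, pvMin_append_new P x c hfil]
      congr 1
      apply List.map_congr_left
      intro pid hpid
      have : pid ≠ x := fun hcon => hx (hcon ▸ hpid)
      exact (pvMin_append_of_ne P x c pid this).symm

/-- B's gathered cost list equals the grouped projection of the zip. -/
theorem projectCostGather_eq_zip (lp lc : List Int) (pid : Int)
    (hlen : lp.length ≤ lc.length) :
    projectCostGather lp lc pid = ((lp.zip lc).filter (fun p => p.1 == pid)).map Prod.snd := by
  induction lp generalizing lc with
  | nil => simp [projectCostGather]
  | cons a lp ih =>
    cases lc with
    | nil => simp at hlen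
    | cons b lc' =>
      have hlen' : lp.length ≤ lc'.length := by simpa using hlen
      simp only [projectCostGather, List.length_cons, List.range_succ_eq_map,
        List.filter_cons, List.filter_map, List.filterMap_cons, List.filterMap_map]
      by_cases ha : a = pid
      · simp only [List.getElem?_cons_zero, ha, decide_true, List.filterMap_cons]
        simp only [List.zip_cons_cons, List.filter_cons, beq_iff_eq, ha, if_pos rfl,
          List.map_cons]
        refine congrArg (b :: ·) ?_
        rw [← ih lc' hlen']
        simp only [List.filterMap_map, Function.comp_def, List.getElem?_cons_succ]
        rfl
      · simp only [List.getElem?_cons_zero, Option.some.injEq, ha, decide_false,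
          Bool.false_eq_true, if_false]
        simp only [List.zip_cons_cons, List.filter_cons, beq_iff_eq,
          if_neg (by simpa using ha)]
        rw [← ih lc' hlen']
        simp only [Bool.false_eq_true, if_false, List.filterMap_map, Function.comp_def,
          List.getElem?_cons_succ]
        rfl

theorem project_Cost_alt_spec (lp lc : List Int) (hlen : lp.length ≤ lc.length) :
    project_Cost_alt lp lc = (pvUniq lp, (pvUniq lp).map (pvMin (lp.zip lc))) := by
  unfold project_Cost_alt
  refine congrArg (Prod.mk (pvUniq lp)) ?_
  apply List.map_congr_left
  intro pid _
  rw [projectCostGather_eq_zip lp lc pid hlen]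
  rfl

-- ===== VERDICT (by name: the statement is the Claim_ definition above) =====
theorem project_Cost_spec : Claim_equal_project_Cost := by
  intro lp lc _ hpre
  unfold Spec_project_Cost
  rw [show project_Cost lp lc = projectCostGoA lc lp 0 [] [] from rfl,
    projectCostGoA_spec lc lp hpre, project_Cost_alt_spec lp lc hpre]
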